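-- pv_equiv track=rewrite | github.com/weixin0605/chat_service | lib/cut_sentence.py | cut_sentence_by_word
-- ===== SOURCE A (Python) =====
-- import string
--
-- letters = string.ascii_lowercase+'+'+'/'
--
-- def cut_sentence_by_word(sentence):
--     """
--     实现中英文分词
--     :param sentence:str句子
--     :return:
--     """
--     result = []
--     temp = ""
--     for word in sentence:
--         if word.lower() in letters:
--             temp+=word
--         else:
--             if temp != '':
--                 result.append(temp.lower())
--                 temp = ""
--             result.append(word.strip())
--     if temp != "":
--         result.append(temp.lower())
--         temp = ""
--     return result
-- ===== SOURCE B (Python) =====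
-- import string
--
-- letters = string.ascii_lowercase + '+' + '/'
--
-- def cut_sentence_by_word(sentence):
--     # staged pipeline: mark every non-letter char with NUL sentinels, split on NUL,
--     # then map each non-empty piece (letter-runs lowered, single non-letters stripped)
--     marked = ''.join(c if c.lower() in letters else '\x00' + c + '\x00'
--                      for c in sentence)
--     pieces = marked.split('\x00')
--     return [p.lower() if p[0].lower() in letters else p.strip()
--             for p in pieces if p != '']
-- ===== Notes on version B (the rewrite author's own statement) =====
-- stated objective: alternative
-- what changed: Replaces A's single-pass accumulator loop (temp buffer with two flush points) by a staged pipeline: mark each non-letter character with NUL sentinels, split the marked string on NUL, then map the non-empty pieces (letter-runs lowered, single non-letter chars stripped).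
import Mathlib
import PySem

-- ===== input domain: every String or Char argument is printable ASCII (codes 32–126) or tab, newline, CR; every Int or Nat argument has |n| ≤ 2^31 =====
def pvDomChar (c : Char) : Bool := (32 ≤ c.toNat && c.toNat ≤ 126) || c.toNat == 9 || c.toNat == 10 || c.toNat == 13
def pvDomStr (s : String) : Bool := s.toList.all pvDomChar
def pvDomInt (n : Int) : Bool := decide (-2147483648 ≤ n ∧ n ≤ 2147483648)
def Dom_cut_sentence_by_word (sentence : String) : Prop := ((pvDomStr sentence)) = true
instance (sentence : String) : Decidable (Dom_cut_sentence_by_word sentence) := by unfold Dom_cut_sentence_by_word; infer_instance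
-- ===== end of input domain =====

-- B replaces A's one-pass accumulator loop by a staged pipeline: mark non-letter chars with
-- NUL sentinels, split on NUL, then map the non-empty pieces (objective: alternative;
-- the sentinel is '\x00', which no string of the stated ASCII domain contains).

-- shared module-level constant: letters = string.ascii_lowercase + '+' + '/'
def pvLetters : List Char := "abcdefghijklmnopqrstuvwxyz+/".toList

-- shared predicate: c.lower() in letters (one-char membership in the letters string)
def pvIsLet (c : Char) : Bool := pvLetters.contains (PySem.Chars.lowerChar c)

-- ===== PORT A =====
-- the for-loop over sentence with state (result, temp); temp kept as List Char (Python str buffer)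
def pvAGo : List Char → List String → List Char → List String
  | [], res, temp => if temp ≠ [] then res ++ [String.ofList (PySem.Chars.lower temp)] else res
  | c :: rest, res, temp =>
    if pvIsLet c then pvAGo rest res (temp ++ [c])
    else if temp ≠ [] then
      pvAGo rest (res ++ [String.ofList (PySem.Chars.lower temp), String.ofList (PySem.Chars.strip [c])]) []
    else pvAGo rest (res ++ [String.ofList (PySem.Chars.strip [c])]) []

def cut_sentence_by_word (sentence : String) : List String :=
  pvAGo sentence.toList [] []

-- ===== PORT B =====
-- marked = ''.join(c if c.lower() in letters else '\x00'+c+'\x00' for c in sentence)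
def pvMark (sentence : List Char) : List Char :=
  PySem.Chars.join [] (sentence.map (fun c => if pvIsLet c then [c] else ['\x00', c, '\x00']))

-- [p.lower() if p[0].lower() in letters else p.strip() for p in pieces if p != '']
-- (p[0] read with headD: the comprehension's filter guarantees p is non-empty)
def cut_sentence_by_word_alt (sentence : String) : List String :=
  ((PySem.Chars.splitOn (pvMark sentence.toList) ['\x00']).filter (· ≠ [])).map
    (fun p => if pvIsLet (p.headD '\x00') then String.ofList (PySem.Chars.lower p)
              else String.ofList (PySem.Chars.strip p))

-- ===== PRECONDITION & SPEC =====
def Spec_cut_sentence_by_word (sentence : String) (out : List String) : Prop := out = cut_sentence_by_word_alt sentence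
instance (sentence : String) (out : List String) : Decidable (Spec_cut_sentence_by_word sentence out) := by unfold Spec_cut_sentence_by_word; infer_instance

-- ===== CLAIM =====
def Claim_equal_cut_sentence_by_word : Prop := ∀ (sentence : String), Dom_cut_sentence_by_word sentence → Spec_cut_sentence_by_word sentence (cut_sentence_by_word sentence)

-- ===== LEMMAS AND PROOFS =====

-- run-segmentation middle form: both ports are reduced to this
def pvBGo : List Char → List String
  | [] => []
  | c :: rest =>
    if pvIsLet c then
      String.ofList (PySem.Chars.lower ((c :: rest).takeWhile pvIsLet)) ::
        pvBGo ((c :: rest).dropWhile pvIsLet)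
    else
      String.ofList (PySem.Chars.strip [c]) :: pvBGo rest
termination_by l => l.length
decreasing_by
  · simp only [List.dropWhile_cons, *]
    exact Nat.lt_succ_of_le (List.length_dropWhile_le _ _)
  · simp

-- ---- A-side: pvAGo = pvBGo ----
theorem pvAGo_append (l : List Char) (res : List String) (temp : List Char) :
    pvAGo l res temp = res ++ pvAGo l [] temp := by
  induction l generalizing res temp with
  | nil => simp [pvAGo]; split <;> simp
  | cons c rest ih =>
    simp only [pvAGo, List.nil_append]
    split
    · exact ih res _
    · split
      · conv_rhs => rw [ih]
        rw [ih]; simp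
      · conv_rhs => rw [ih]
        rw [ih]; simp

theorem pvAGo_eq_bgo (l : List Char) (temp : List Char) :
    pvAGo l [] temp =
      if temp = [] then pvBGo l
      else String.ofList (PySem.Chars.lower (temp ++ l.takeWhile pvIsLet)) ::
             pvBGo (l.dropWhile pvIsLet) := by
  induction l generalizing temp with
  | nil =>
    simp [pvAGo, pvBGo]
  | cons c rest ih =>
    simp only [pvAGo]
    by_cases hc : pvIsLet c = true
    · rw [if_pos hc, ih (temp ++ [c]), if_neg (by simp)]
      by_cases ht : temp = [] <;>
        simp [ht, pvBGo, List.takeWhile_cons, List.dropWhile_cons, hc]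
    · rw [if_neg hc]
      by_cases ht : temp = []
      · rw [if_neg (by simp [ht]), pvAGo_append, ih []]
        simp [ht, pvBGo, List.takeWhile_cons, List.dropWhile_cons, hc]
      · rw [if_pos ht, pvAGo_append, ih []]
        simp [ht, pvBGo, List.takeWhile_cons, List.dropWhile_cons, hc]

-- ---- B-side: split-on-NUL of the marked string = pvBGo ----

-- split on a single NUL, structurally
def pvSplit : List Char → List (List Char)
  | [] => [[]]
  | c :: t => if c = '\x00' then [] :: pvSplit t else (pvSplit t).modifyHead (c :: ·)

theorem pvSplit_ne_nil (l : List Char) : pvSplit l ≠ [] := by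
  induction l with
  | nil => simp [pvSplit]
  | cons c t ih =>
    simp only [pvSplit]
    split
    · simp
    · cases h : pvSplit t with
      | nil => exact absurd h ih
      | cons p ps => simp [List.modifyHead]

theorem pvSplit_go_eq (l : List Char) : ∀ (fuel : Nat), l.length ≤ fuel →
    ∀ (cur : List Char) (acc : List (List Char)),
    PySem.Chars.splitOn.go ['\x00'] fuel l cur acc =
      acc.reverse ++ ((pvSplit l).modifyHead (cur.reverse ++ ·)) := by
  induction l with
  | nil =>
    intro fuel _ cur acc
    cases fuel with
    | zero => simp [PySem.Chars.splitOn.go.eq_1, pvSplit, List.modifyHead]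
    | succ f => rw [PySem.Chars.splitOn.go.eq_2 _ _ _ _ (by omega)]; simp [pvSplit, List.modifyHead]
  | cons c rest ih =>
    intro fuel hf cur acc
    cases fuel with
    | zero => simp at hf
    | succ f =>
      rw [PySem.Chars.splitOn.go.eq_3]
      by_cases hc : c = '\x00'
      · subst hc
        rw [if_pos (by simp [List.isPrefixOf])]
        simp only [List.length_cons, List.length_nil, List.drop_succ_cons, List.drop_zero]
        rw [ih f (by simpa using hf) [] (cur.reverse :: acc)]
        simp only [pvSplit, if_pos rfl, List.modifyHead, List.reverse_cons,
          List.reverse_nil, List.nil_append, List.append_assoc, List.cons_append]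
        cases pvSplit rest <;> simp
      · rw [if_neg (by simp [List.isPrefixOf]; exact fun h => (hc h.symm).elim)]
        rw [ih f (by simpa using hf) (c :: cur) acc]
        cases h : pvSplit rest with
        | nil => exact absurd h (pvSplit_ne_nil rest)
        | cons p ps => simp [pvSplit, hc, h, List.modifyHead]

theorem splitOn_nul (l : List Char) :
    PySem.Chars.splitOn l ['\x00'] = pvSplit l := by
  show PySem.Chars.splitOn.go ['\x00'] (l.length + 1) l [] [] = _
  rw [pvSplit_go_eq l (l.length + 1) (by omega) [] []]
  cases h : pvSplit l with
  | nil => exact absurd h (pvSplit_ne_nil l)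
  | cons p ps => simp [List.modifyHead]

-- join with empty separator concatenates
theorem join_nil_flatten (parts : List (List Char)) :
    PySem.Chars.join [] parts = parts.flatten := by
  simp only [PySem.Chars.join]
  induction parts with
  | nil => rfl
  | cons h t ih =>
    cases t with
    | nil => simp [List.intercalate]
    | cons h2 t2 =>
      simp only [List.intercalate] at *
      rw [List.intersperse_cons₂]
      simp [ih]

-- the pieces of the marked string, structurally over the input
def pvPieces : List Char → List (List Char)
  | [] => [[]]
  | c :: t => if pvIsLet c then (pvPieces t).modifyHead (c :: ·) else [] :: [c] :: pvPieces t

theorem pvIsLet_ne_nul {c : Char} (h : pvIsLet c = true) : c ≠ '\x00' := by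
  intro hEq; subst hEq; exact absurd h (by decide)

theorem pvSplit_mark (l : List Char) (h : ∀ c ∈ l, c ≠ '\x00') :
    pvSplit (pvMark l) = pvPieces l := by
  induction l with
  | nil => simp [pvMark, pvSplit, pvPieces, PySem.Chars.join_nil]
  | cons c t ih =>
    have ht : ∀ x ∈ t, x ≠ '\x00' := fun x hx => h x (List.mem_cons_of_mem _ hx)
    have hmark : pvMark (c :: t) =
        (if pvIsLet c then [c] else ['\x00', c, '\x00']) ++ pvMark t := by
      simp [pvMark, join_nil_flatten]
    by_cases hc : pvIsLet c = true
    · rw [hmark, if_pos hc]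
      simp only [List.cons_append, List.nil_append, pvSplit,
        if_neg (pvIsLet_ne_nul hc), ih ht, pvPieces, if_pos hc]
    · rw [hmark, if_neg hc]
      have hcn : c ≠ '\x00' := h c (List.mem_cons_self)
      simp only [List.cons_append, List.nil_append, pvSplit, if_neg hcn,
        ih ht, pvPieces, if_neg hc]
      cases hp : pvPieces t with
      | nil =>
        exfalso
        have := pvSplit_ne_nil (pvMark t)
        rw [ih ht, hp] at this; exact this rfl
      | cons p ps => simp [List.modifyHead]

-- per-piece token: what the final comprehension produces on a non-empty piece
def pvTok : List Char → Option String
  | [] => none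
  | c :: cs => some (if pvIsLet c then String.ofList (PySem.Chars.lower (c :: cs))
                     else String.ofList (PySem.Chars.strip (c :: cs)))

theorem filter_map_eq_filterMap (ps : List (List Char)) :
    (ps.filter (· ≠ [])).map
      (fun p => if pvIsLet (p.headD '\x00') then String.ofList (PySem.Chars.lower p)
                else String.ofList (PySem.Chars.strip p)) = ps.filterMap pvTok := by
  induction ps with
  | nil => rfl
  | cons p t ih =>
    cases p with
    | nil =>
      rw [List.filterMap_cons_none (by rfl)]
      simpa using ih
    | cons c cs =>
      rw [List.filterMap_cons_some (show pvTok (c :: cs) = some _ from rfl)]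
      have hf : ((c :: cs) :: t).filter (· ≠ []) = (c :: cs) :: t.filter (· ≠ []) := by simp
      rw [hf, List.map_cons, ih]
      simp

theorem shape_to_total (l : List Char) (ps : List (List Char))
    (h1 : pvPieces l = (l.takeWhile pvIsLet) :: ps)
    (h2 : ps.filterMap pvTok = pvBGo (l.dropWhile pvIsLet)) :
    (pvPieces l).filterMap pvTok = pvBGo l := by
  cases l with
  | nil => simp [pvPieces, pvTok, pvBGo]
  | cons c t =>
    rw [h1]
    by_cases hc : pvIsLet c = true
    · have htw : (c :: t).takeWhile pvIsLet = c :: t.takeWhile pvIsLet := by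
        simp [List.takeWhile_cons, hc]
      have hdw : (c :: t).dropWhile pvIsLet = t.dropWhile pvIsLet := by
        simp [List.dropWhile_cons, hc]
      rw [hdw] at h2
      rw [htw, List.filterMap_cons_some (show pvTok (c :: t.takeWhile pvIsLet) = some _ from rfl)]
      rw [h2]
      simp [pvBGo, List.takeWhile_cons, List.dropWhile_cons, hc]
    · have htw : (c :: t).takeWhile pvIsLet = [] := by
        simp [List.takeWhile_cons, hc]
      have hdw : (c :: t).dropWhile pvIsLet = c :: t := by
        simp [List.dropWhile_cons, hc]
      rw [hdw] at h2
      rw [htw, List.filterMap_cons_none (by rfl)]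
      exact h2

theorem pvPieces_shape (l : List Char) :
    ∃ ps, pvPieces l = (l.takeWhile pvIsLet) :: ps ∧
      ps.filterMap pvTok = pvBGo (l.dropWhile pvIsLet) := by
  induction l with
  | nil => exact ⟨[], by simp [pvPieces, pvBGo]⟩
  | cons c t ih =>
    obtain ⟨ps, h1, h2⟩ := ih
    by_cases hc : pvIsLet c = true
    · refine ⟨ps, ?_, ?_⟩
      · simp [pvPieces, hc, h1, List.takeWhile_cons, List.modifyHead]
      · simpa [List.dropWhile_cons, hc] using h2
    · refine ⟨[c] :: pvPieces t, ?_, ?_⟩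
      · simp [pvPieces, hc, List.takeWhile_cons]
      · have hmain : (pvPieces t).filterMap pvTok = pvBGo t := shape_to_total t ps h1 h2
        have hdw : (c :: t).dropWhile pvIsLet = c :: t := by
          simp [List.dropWhile_cons, hc]
        rw [hdw, List.filterMap_cons_some (show pvTok [c] = some _ from rfl)]
        rw [hmain]
        simp [pvBGo, hc]

theorem pieces_filterMap (l : List Char) :
    (pvPieces l).filterMap pvTok = pvBGo l := by
  obtain ⟨ps, h1, h2⟩ := pvPieces_shape l
  exact shape_to_total l ps h1 h2

-- ===== VERDICT =====
theorem cut_sentence_by_word_spec : Claim_equal_cut_sentence_by_word := by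
  intro s hdom
  unfold Spec_cut_sentence_by_word cut_sentence_by_word cut_sentence_by_word_alt
  have hnul : ∀ c ∈ s.toList, c ≠ '\x00' := by
    intro c hc hEq
    have h := List.all_eq_true.mp hdom c hc
    subst hEq; exact absurd h (by decide)
  rw [splitOn_nul, pvSplit_mark _ hnul, filter_map_eq_filterMap, pieces_filterMap,
    pvAGo_eq_bgo]
  simp
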